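-- pv_equiv track=rewrite | github.com/TechShreyash/AniDL | Utils/File.py | convertFilePath
-- ===== SOURCE A (Python) =====
-- def convertFilePath(path):
--     x = ""
--     for i in path:
--         if i == ".":
--             x += i
--         elif i == "/":
--             x += i
--         elif i.isalnum():
--             x += i
--         elif i == " ":
--             x += i
--         elif i == "-":
--             x += i
--
--     while "  " in x:
--         x = x.replace("  ", " ")
--     return x
-- ===== SOURCE B (Python) =====
-- def _keep(c):
--     return c in "./- " or c.isalnum()
--
--
-- def convertFilePath(path):
--     # single fused pass: filter allowed chars and collapse space runs as we go
--     out = []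
--     for c in path:
--         if _keep(c):
--             if c != " " or not out or out[-1] != " ":
--                 out.append(c)
--     return "".join(out)
-- ===== Notes on version B (the rewrite author's own statement) =====
-- stated objective: simpler
-- what changed: Replaces A's two-phase scheme (build the filtered string, then a while-loop that repeatedly rescans it replacing double spaces with single ones) with a single fused pass that emits each kept character unless it is a space following an emitted space, collapsing space runs in one traversal with no rescans.
import Mathlib
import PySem

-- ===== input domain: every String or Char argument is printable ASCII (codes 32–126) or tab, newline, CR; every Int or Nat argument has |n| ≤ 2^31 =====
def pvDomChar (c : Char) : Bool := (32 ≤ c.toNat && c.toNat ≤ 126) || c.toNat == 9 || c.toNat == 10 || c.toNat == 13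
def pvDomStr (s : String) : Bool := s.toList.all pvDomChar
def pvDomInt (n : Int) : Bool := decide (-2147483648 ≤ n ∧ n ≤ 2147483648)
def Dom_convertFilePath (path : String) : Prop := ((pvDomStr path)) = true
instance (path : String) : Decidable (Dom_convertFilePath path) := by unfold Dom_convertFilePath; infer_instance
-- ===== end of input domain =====

-- B fuses A's two passes (filter, then repeated "  "→" " replace) into one pass that skips a
-- space whenever the last emitted character is a space; objective: simpler (one pass, no rescans).

-- ===== PORT A =====
-- pvR and the lemmas up to pvReplace_lt exist only to justify TERMINATION of A's
-- `while "  " in x: x = x.replace("  ", " ")` loop: each replace pass is pvR and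
-- strictly shortens the string while "  " occurs in it.
def pvR : List Char → List Char
  | [] => []
  | [c] => [c]
  | c :: d :: t => if c = ' ' ∧ d = ' ' then ' ' :: pvR t else c :: pvR (d :: t)

lemma pvR_go (fuel : Nat) : ∀ (l acc : List Char), l.length ≤ fuel →
    PySem.Chars.replace.go [' ', ' '] [' '] fuel l acc = acc.reverse ++ pvR l := by
  induction fuel with
  | zero =>
    intro l acc h
    have : l = [] := List.length_eq_zero_iff.mp (Nat.le_zero.mp h)
    subst this; simp [PySem.Chars.replace.go, pvR]
  | succ n ih =>
    intro l acc h
    match l with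
    | [] => simp [PySem.Chars.replace.go, pvR]
    | [c] =>
      have hpre : [' ', ' '].isPrefixOf [c] = false := by
        simp [List.isPrefixOf]
      simp only [PySem.Chars.replace.go, hpre]
      rw [ih [] (c :: acc) (by simp)]
      simp [pvR]
    | c :: d :: t =>
      by_cases hcd : c = ' ' ∧ d = ' '
      · obtain ⟨rfl, rfl⟩ := hcd
        have hpre : [' ', ' '].isPrefixOf (' ' :: ' ' :: t) = true := by
          simp [List.isPrefixOf]
        simp only [PySem.Chars.replace.go, hpre, if_true]
        rw [show List.drop [' ', ' '].length (' ' :: ' ' :: t) = t from rfl,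
          show ([' '].reverse ++ acc) = ' ' :: acc from rfl,
          ih t (' ' :: acc) (by simp at h ⊢; omega)]
        simp [pvR]
      · have hpre : [' ', ' '].isPrefixOf (c :: d :: t) = false := by
          simp only [List.isPrefixOf, Bool.and_true]
          by_contra hcon
          simp only [Bool.not_eq_false, Bool.and_eq_true, beq_iff_eq] at hcon
          exact hcd ⟨hcon.1.symm, hcon.2.symm⟩
        simp only [PySem.Chars.replace.go, hpre, Bool.false_eq_true, if_false]
        rw [ih (d :: t) (c :: acc) (by simp at h ⊢; omega)]
        simp [pvR, hcd]

lemma pvR_le (l : List Char) : (pvR l).length ≤ l.length := by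
  induction l using pvR.induct with
  | case1 => simp [pvR]
  | case2 c => simp [pvR]
  | case3 c d t h ih => simp only [pvR, if_pos h, List.length_cons]; simpa using Nat.le_succ_of_le ih
  | case4 c d t h ih =>
    simp only [pvR, if_neg h, List.length_cons] at ih ⊢; omega

lemma pvR_lt (l : List Char) (h : [' ', ' '] <:+: l) : (pvR l).length < l.length := by
  induction l using pvR.induct with
  | case1 => simp at h
  | case2 c =>
    exfalso
    have := h.length_le; simp at this
  | case3 c d t hcd ih =>
    have := pvR_le t
    simp only [pvR, if_pos hcd, List.length_cons]
    omega
  | case4 c d t hcd ih =>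
    simp only [pvR, if_neg hcd, List.length_cons]
    have hnp : ¬ ([' ', ' '] <+: c :: d :: t) := by
      intro hp
      rcases List.cons_prefix_cons.mp hp with ⟨rfl, hp2⟩
      rcases List.cons_prefix_cons.mp hp2 with ⟨rfl, _⟩
      exact hcd ⟨rfl, rfl⟩
    have ht : [' ', ' '] <:+: d :: t := (List.infix_cons_iff.mp h).resolve_left hnp
    have := ih ht
    simp only [List.length_cons] at this ⊢; omega

lemma pvReplace_eq (x : List Char) :
    PySem.Chars.replace x [' ', ' '] [' '] = pvR x := by
  simp only [PySem.Chars.replace, List.isEmpty_cons, Bool.false_eq_true, if_false]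
  simpa using pvR_go x.length x [] (le_refl _)

lemma pvReplace_lt (x : List Char) (h : PySem.Chars.isIn [' ', ' '] x = true) :
    (PySem.Chars.replace x [' ', ' '] [' ']).length < x.length := by
  rw [pvReplace_eq]
  exact pvR_lt x ((PySem.Chars.isIn_iff_infix _ _).mp h)

-- the `while "  " in x: x = x.replace("  ", " ")` loop of A
def pvLoopA (x : List Char) : List Char :=
  if h : PySem.Chars.isIn [' ', ' '] x then pvLoopA (PySem.Chars.replace x [' ', ' '] [' ']) else x
termination_by x.length
decreasing_by exact pvReplace_lt x h

def convertFilePath (path : String) : String :=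
  let x : List Char := path.toList.foldl (fun x i =>
    if i = '.' then x ++ [i]
    else if i = '/' then x ++ [i]
    else if PySem.Chars.isalnum i then x ++ [i]
    else if i = ' ' then x ++ [i]
    else if i = '-' then x ++ [i]
    else x) []
  String.mk (pvLoopA x)

-- ===== PORT B =====
def pvKeepB (c : Char) : Bool :=
  PySem.Chars.isIn [c] ("./- ").toList || PySem.Chars.isalnum c

def convertFilePath_alt (path : String) : String :=
  let out : List Char := path.toList.foldl (fun out c =>
    if pvKeepB c then
      if c ≠ ' ' ∨ out = [] ∨ PySem.List.pyGet? out (-1) ≠ some ' ' then out ++ [c] else out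
    else out) []
  String.mk out

-- ===== PRECONDITION & SPEC =====
def Spec_convertFilePath (path : String) (out : String) : Prop := out = convertFilePath_alt path
instance (path : String) (out : String) : Decidable (Spec_convertFilePath path out) := by unfold Spec_convertFilePath; infer_instance

-- ===== CLAIM (what is proved, stated in full; the proofs are below) =====
def Claim_equal_convertFilePath : Prop := ∀ (path : String), Dom_convertFilePath path → Spec_convertFilePath path (convertFilePath path)

-- ===== LEMMAS AND PROOFS =====

-- A's if/elif filter chain, as one boolean predicate
def pvKeepA (c : Char) : Bool :=
  c == '.' || c == '/' || PySem.Chars.isalnum c || c == ' ' || c == '-'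

lemma pvKeepB_eq (c : Char) : pvKeepB c = pvKeepA c := by
  have hs : ("./- ").toList = ['.', '/', '-', ' '] := rfl
  rw [Bool.eq_iff_iff]
  simp only [pvKeepB, pvKeepA, hs, Bool.or_eq_true, beq_iff_eq,
    PySem.Chars.isIn_iff_infix, List.singleton_infix_iff, List.mem_cons, List.not_mem_nil, or_false]
  tauto

lemma pvFoldA (l : List Char) (acc : List Char) :
    l.foldl (fun x i =>
      if i = '.' then x ++ [i]
      else if i = '/' then x ++ [i]
      else if PySem.Chars.isalnum i then x ++ [i]
      else if i = ' ' then x ++ [i]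
      else if i = '-' then x ++ [i]
      else x) acc = acc ++ l.filter pvKeepA := by
  have h : (fun (x : List Char) i =>
      if i = '.' then x ++ [i]
      else if i = '/' then x ++ [i]
      else if PySem.Chars.isalnum i then x ++ [i]
      else if i = ' ' then x ++ [i]
      else if i = '-' then x ++ [i]
      else x) = fun (x : List Char) i => if pvKeepA i then x ++ [i] else x := by
    funext x i
    split_ifs with h1 h2 h3 h4 h5 h6 <;> simp_all [pvKeepA]
  rw [h]
  simpa using PySem.List.foldl_append_if pvKeepA id l acc

-- the collapsed form: pvCl sp m emits m with runs of spaces collapsed to one, where sp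
-- records whether the previously emitted character was a space
def pvCl (sp : Bool) : List Char → List Char
  | [] => []
  | c :: t => if c = ' ' then (if sp then pvCl true t else ' ' :: pvCl true t) else c :: pvCl false t

lemma pvFoldB (l : List Char) : ∀ (acc : List Char),
    l.foldl (fun out c =>
      if pvKeepB c then
        if c ≠ ' ' ∨ out = [] ∨ PySem.List.pyGet? out (-1) ≠ some ' ' then out ++ [c] else out
      else out) acc
    = (l.filter pvKeepB).foldl (fun out c =>
        if c ≠ ' ' ∨ out = [] ∨ PySem.List.pyGet? out (-1) ≠ some ' ' then out ++ [c] else out) acc := by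
  induction l with
  | nil => intro acc; rfl
  | cons c t ih =>
    intro acc
    by_cases hk : pvKeepB c
    · simp only [List.foldl_cons, if_pos hk, List.filter_cons, hk, ite_true, ih]
    · simp only [List.foldl_cons, if_neg hk, List.filter_cons, hk, Bool.false_eq_true, ite_false, ih]

lemma pvFoldB' (m : List Char) : ∀ (acc : List Char),
    m.foldl (fun out c =>
      if c ≠ ' ' ∨ out = [] ∨ PySem.List.pyGet? out (-1) ≠ some ' ' then out ++ [c] else out) acc
    = acc ++ pvCl (acc.getLast? == some ' ') m := by
  induction m with
  | nil => intro acc; simp [pvCl]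
  | cons c t ih =>
    intro acc
    by_cases hc : c = ' '
    · subst hc
      by_cases hb : acc.getLast? = some ' '
      · have hne : acc ≠ [] := by intro h; subst h; simp at hb
        have hcond : ¬ (' ' ≠ ' ' ∨ acc = [] ∨ PySem.List.pyGet? acc (-1) ≠ some ' ') := by
          simp [PySem.List.pyGet?_neg_one, hb, hne]
        simp only [List.foldl_cons, if_neg hcond, ih, hb, pvCl, if_pos rfl, beq_self_eq_true, ite_true]
      · have hcond : (' ' ≠ ' ' ∨ acc = [] ∨ PySem.List.pyGet? acc (-1) ≠ some ' ') := by
          rcases eq_or_ne acc [] with h | h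
          · exact Or.inr (Or.inl h)
          · exact Or.inr (Or.inr (by simp [PySem.List.pyGet?_neg_one, hb]))
        simp only [List.foldl_cons, if_pos hcond, ih, List.getLast?_concat]
        have hbb : (acc.getLast? == some ' ') = false := by simp [hb]
        simp [pvCl, hbb, List.append_assoc]
    · have hcond : (c ≠ ' ' ∨ acc = [] ∨ PySem.List.pyGet? acc (-1) ≠ some ' ') := Or.inl hc
      simp only [List.foldl_cons, if_pos hcond, ih, List.getLast?_concat]
      have hbb : ((some c : Option Char) == some ' ') = false := by simp [hc]
      simp [pvCl, hbb, hc, List.append_assoc]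

lemma pvR_cl (m : List Char) : ∀ (b : Bool), pvCl b (pvR m) = pvCl b m := by
  induction m using pvR.induct with
  | case1 => intro b; simp [pvR]
  | case2 c => intro b; simp [pvR]
  | case3 c d t h ih =>
    intro b
    obtain ⟨rfl, rfl⟩ := h
    cases b <;> simp [pvR, pvCl, ih]
  | case4 c d t h ih =>
    intro b
    by_cases hc : c = ' '
    · subst hc
      have hd : d ≠ ' ' := fun hd => h ⟨rfl, hd⟩
      cases b <;> simp [pvR, pvCl, hd, ih]
    · simp [pvR, pvCl, h, hc, ih]

lemma pvCl_fix (m : List Char) (h : ¬ ([' ', ' '] <:+: m)) : pvCl false m = m := by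
  induction m with
  | nil => simp [pvCl]
  | cons c t ih =>
    have hnp : ¬ ([' ', ' '] <+: c :: t) := fun hp => h (hp.isInfix)
    have hnt : ¬ ([' ', ' '] <:+: t) := fun hi => h (List.infix_cons_iff.mpr (Or.inr hi))
    by_cases hc : c = ' '
    · subst hc
      match t with
      | [] => simp [pvCl]
      | d :: u =>
        have hd : d ≠ ' ' := by
          intro hd; subst hd
          exact hnp (List.cons_prefix_cons.mpr ⟨rfl, List.cons_prefix_cons.mpr ⟨rfl, List.nil_prefix⟩⟩)
        have := ih hnt
        simp only [pvCl, if_pos rfl, ite_true, if_neg hd] at this ⊢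
        simp_all [pvCl, hd]
    · have := ih hnt
      simp [pvCl, hc, this]

lemma pvLoopA_eq (x : List Char) : pvLoopA x = pvCl false x := by
  induction x using pvLoopA.induct with
  | case1 x h ih =>
    rw [pvLoopA, dif_pos h, ih, pvReplace_eq, pvR_cl]
  | case2 x h =>
    rw [pvLoopA, dif_neg h,
      pvCl_fix x ((PySem.Chars.isIn_eq_false_iff _ _).mp (by simpa using h))]

lemma pvFilter_eq (l : List Char) : l.filter pvKeepB = l.filter pvKeepA :=
  List.filter_congr (fun c _ => pvKeepB_eq c)

-- ===== VERDICT (by name: the statement is the Claim_ definition above) =====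
theorem convertFilePath_spec : Claim_equal_convertFilePath := by
  intro path _
  show convertFilePath path = convertFilePath_alt path
  simp only [convertFilePath, convertFilePath_alt]
  rw [pvFoldA, pvLoopA_eq, pvFoldB, pvFoldB', pvFilter_eq]
  simp
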